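-- pv_equiv track=rewrite | github.com/GioTro/Competative_Programming_Solutions | Kattis/Python/iBoard.py | solve
-- ===== SOURCE A (Python) =====
-- def solve(s):
--     left, right, sequence = True, True, "".join(
--         [bin(ord(i))[2:].zfill(7)[::-1] for i in s])
--     for i in sequence:
--         if i == '1':
--             left = not left
--         else:
--             right = not right
--     return 'free' if (left and right) else 'trapped'
-- ===== SOURCE B (Python) =====
-- def solve(s):
--     ones = 0
--     bits = 0
--     for c in s:
--         b = bin(ord(c))[2:]
--         ones += b.count('1')
--         bits += max(7, len(b))
--     return 'free' if ones % 2 == 0 and (bits - ones) % 2 == 0 else 'trapped'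
-- ===== Notes on version B (the rewrite author's own statement) =====
-- stated objective: simpler
-- what changed: Instead of materialising the flattened reversed bit-stream and toggling two booleans per bit, B accumulates per-character 1-bit and total-bit counts in one pass and decides by a final parity check on the two totals.
import Mathlib
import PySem

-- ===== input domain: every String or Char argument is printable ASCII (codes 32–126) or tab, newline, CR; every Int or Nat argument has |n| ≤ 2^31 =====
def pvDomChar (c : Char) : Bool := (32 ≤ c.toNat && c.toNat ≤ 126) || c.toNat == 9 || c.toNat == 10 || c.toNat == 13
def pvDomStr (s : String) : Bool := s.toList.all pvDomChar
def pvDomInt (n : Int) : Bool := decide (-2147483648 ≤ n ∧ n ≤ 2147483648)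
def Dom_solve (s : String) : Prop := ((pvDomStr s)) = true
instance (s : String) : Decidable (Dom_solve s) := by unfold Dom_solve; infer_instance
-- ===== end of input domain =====

-- B replaces A's flattened bit-stream with per-bit boolean toggling by a single
-- per-character pass accumulating one-bit and total-bit counts, deciding by a final
-- parity check (objective: simpler).

-- ===== PORT A =====
-- bin(ord(c))[2:].zfill(7)[::-1]  (Nat.toDigits 2 n is the binary digit string, MSB first, '0' for 0 — exactly bin(n)[2:] for n ≥ 0)
def pvBits7Rev (c : Char) : List Char :=
  let b := Nat.toDigits 2 c.toNat
  (List.replicate (7 - b.length) '0' ++ b).reverse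

def solve (s : String) : String :=
  let sequence := s.toList.flatMap pvBits7Rev
  let lr := sequence.foldl
    (fun (lr : Bool × Bool) i => if i = '1' then (!lr.1, lr.2) else (lr.1, !lr.2))
    (true, true)
  if lr.1 && lr.2 then "free" else "trapped"

-- ===== PORT B =====
def solve_alt (s : String) : String :=
  let p := s.toList.foldl
    (fun (acc : Nat × Nat) c =>
      let b := Nat.toDigits 2 c.toNat
      (acc.1 + b.count '1', acc.2 + max 7 b.length))
    (0, 0)
  if p.1 % 2 == 0 && (p.2 - p.1) % 2 == 0 then "free" else "trapped"

-- ===== PRECONDITION & SPEC =====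
def Spec_solve (s : String) (out : String) : Prop := out = solve_alt s
instance (s : String) (out : String) : Decidable (Spec_solve s out) := by unfold Spec_solve; infer_instance

-- ===== CLAIM (what is proved, stated in full; the proofs are below) =====
def Claim_equal_solve : Prop := ∀ (s : String), Dom_solve s → Spec_solve s (solve s)

-- ===== LEMMAS AND PROOFS =====

-- A's toggle loop computes the parities of the counts of '1' and non-'1' bits.
lemma pv_toggle (l : List Char) (a b : Bool) :
    l.foldl (fun (lr : Bool × Bool) i => if i = '1' then (!lr.1, lr.2) else (lr.1, !lr.2)) (a, b)
      = (xor a (decide (l.count '1' % 2 = 1)),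
         xor b (decide (l.countP (fun ch => !(ch == '1')) % 2 = 1))) := by
  induction l generalizing a b with
  | nil => simp
  | cons c t ih =>
    by_cases h : c = '1'
    · simp [h, ih]
      rcases Nat.even_or_odd (t.count '1') with he | ho
      · simp [Nat.even_iff.mp he, Nat.add_mod]
      · simp [Nat.odd_iff.mp ho, Nat.add_mod]
    · simp [h, ih]
      rcases Nat.even_or_odd (t.countP (fun ch => !(ch == '1'))) with he | ho
      · simp [Nat.even_iff.mp he, Nat.add_mod]
      · simp [Nat.odd_iff.mp ho, Nat.add_mod]

lemma pv_countP_ne_one (l : List Char) :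
    l.countP (fun ch => !(ch == '1')) = l.length - l.count '1' := by
  have h := List.length_eq_countP_add_countP (p := fun ch : Char => ch == '1') (l := l)
  simp only [decide_not, Bool.decide_eq_true] at h
  rw [List.count_eq_countP]; omega

-- per-character facts about A's padded reversed bit block
lemma pv_block_count (c : Char) :
    (pvBits7Rev c).count '1' = (Nat.toDigits 2 c.toNat).count '1' := by
  simp [pvBits7Rev, List.count_append, List.count_replicate]

lemma pv_block_length (c : Char) :
    (pvBits7Rev c).length = max 7 (Nat.toDigits 2 c.toNat).length := by
  simp [pvBits7Rev]; omega

-- B's fold is the pair of sums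
lemma pv_fold_sum (l : List Char) (x y : Nat) :
    l.foldl (fun (acc : Nat × Nat) c =>
        let b := Nat.toDigits 2 c.toNat
        (acc.1 + b.count '1', acc.2 + max 7 b.length)) (x, y)
      = (x + (l.map (fun c => (Nat.toDigits 2 c.toNat).count '1')).sum,
         y + (l.map (fun c => max 7 (Nat.toDigits 2 c.toNat).length)).sum) := by
  induction l generalizing x y with
  | nil => simp
  | cons c t ih => simp [ih]; omega

-- totals over the flattened stream equal B's sums
lemma pv_stream_ones (l : List Char) :
    (l.flatMap pvBits7Rev).count '1'
      = (l.map (fun c => (Nat.toDigits 2 c.toNat).count '1')).sum := by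
  simp only [List.count_eq_countP, List.countP_flatMap]
  exact congrArg List.sum (List.map_congr_left
    (fun c _ => by simpa [List.count_eq_countP] using pv_block_count c))

lemma pv_stream_len (l : List Char) :
    (l.flatMap pvBits7Rev).length
      = (l.map (fun c => max 7 (Nat.toDigits 2 c.toNat).length)).sum := by
  simp only [List.length_flatMap]
  exact congrArg List.sum (List.map_congr_left (fun c _ => pv_block_length c))

-- ===== VERDICT (by name: the statement is the Claim_ definition above) =====
theorem solve_spec : Claim_equal_solve := by
  intro s _
  unfold Spec_solve
  simp only [solve, solve_alt]
  rw [pv_toggle, pv_fold_sum]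
  set O := (s.toList.map (fun c => (Nat.toDigits 2 c.toNat).count '1')).sum with hO
  set L := (s.toList.map (fun c => max 7 (Nat.toDigits 2 c.toNat).length)).sum with hL
  have h1 : (s.toList.flatMap pvBits7Rev).count '1' = O := pv_stream_ones s.toList
  have h2 : (s.toList.flatMap pvBits7Rev).countP (fun ch => !(ch == '1')) = L - O := by
    rw [pv_countP_ne_one, pv_stream_len, h1]
  rw [h1, h2]
  simp only [Bool.true_xor]
  by_cases e1 : O % 2 = 1 <;> by_cases e2 : (L - O) % 2 = 1 <;>
    simp [e1, e2]
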